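-- pv_equiv track=rewrite | github.com/karsevar/Code_Challenge_Practice | beautiful_days_at_the_movies/beautiful_days.py | beautifulDays
-- ===== SOURCE A (Python) =====
-- def beautifulDays(i, j, k):
--     # create a beautiful day counter variable
--     # first create a loop that will start at ith day and end at jth day plus one
--         # for each current day create a reversed integer and find the difference
--         # between the reversed day and the current day
--
--         # if the difference is divisible by k increment the beatiful day
--         # counter by one
--
--     beautiful_counter = 0
--
--     for current_day in range(i, j+1):
--         reversed_int = ''
--         day_string = str(current_day)
--         for integer in range(len(day_string)-1, -1, -1):
--             reversed_int += day_string[integer]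
--
--         if (current_day - int(reversed_int)) % k == 0:
--             beautiful_counter += 1
--
--     return beautiful_counter
-- ===== SOURCE B (Python) =====
-- def beautifulDays(i, j, k):
--     # Idiomatic one-liner: reverse via slicing, count via a generator expression.
--     return sum(1 for day in range(i, j + 1) if (day - int(str(day)[::-1])) % k == 0)
-- ===== Notes on version B (the rewrite author's own statement) =====
-- stated objective: idiomatic
-- what changed: Replaces the explicit counter loop with a sum over a generator expression and replaces the inner character-by-character index loop that builds the reversed string with the slice str(day)[::-1], so the hand-written string-reversal loop disappears.
import Mathlib
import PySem

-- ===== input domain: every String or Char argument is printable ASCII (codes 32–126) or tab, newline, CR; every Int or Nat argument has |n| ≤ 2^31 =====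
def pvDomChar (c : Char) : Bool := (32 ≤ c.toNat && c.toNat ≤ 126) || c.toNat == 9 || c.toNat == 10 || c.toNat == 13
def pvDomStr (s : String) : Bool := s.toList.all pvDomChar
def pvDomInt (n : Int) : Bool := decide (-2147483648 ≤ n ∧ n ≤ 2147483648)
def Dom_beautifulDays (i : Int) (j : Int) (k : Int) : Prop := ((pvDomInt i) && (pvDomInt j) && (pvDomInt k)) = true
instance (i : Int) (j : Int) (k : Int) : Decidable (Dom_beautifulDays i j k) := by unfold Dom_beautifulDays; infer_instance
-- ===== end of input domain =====

-- B replaces A's counter loop with sum over a generator and A's index-loop string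
-- reversal with the slice str(day)[::-1] (objective: idiomatic; same cost).

-- ===== PORT A =====
-- for current_day in range(i, j+1): build reversed_int char by char with a countdown
-- index loop, then test (current_day - int(reversed_int)) % k == 0.
def beautifulDays (i : Int) (j : Int) (k : Int) : Int :=
  (PySem.List.pyRange i (j + 1) 1).foldl
    (fun beautiful_counter current_day =>
      let day_string : List Char := PySem.Int.toChars current_day
      let reversed_int : List Char :=
        (PySem.List.pyRange (PySem.List.len day_string - 1) (-1) (-1)).foldl
          (fun acc integer => acc ++ [PySem.List.pyGetD day_string integer ' ']) []
      match PySem.Int.ofChars? reversed_int with   -- none = ValueError, excluded by Pre_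
      | some r => if PySem.Int.mod (current_day - r) k = 0
                  then beautiful_counter + 1 else beautiful_counter
      | none => beautiful_counter)
    0

-- ===== PORT B =====
-- sum(1 for day in range(i, j+1) if (day - int(str(day)[::-1])) % k == 0)
def beautifulDays_alt (i : Int) (j : Int) (k : Int) : Int :=
  ((PySem.List.pyRange i (j + 1) 1).map
    (fun day =>
      match PySem.List.slice? (PySem.Int.toChars day) none none (-1) with
      | some rev =>
        match PySem.Int.ofChars? rev with
        | some r => if PySem.Int.mod (day - r) k = 0 then (1 : Int) else 0
        | none => (0 : Int)
      | none => (0 : Int))).sum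

-- ===== PRECONDITION & SPEC =====
-- Pre_ excludes exactly the inputs where the Python A raises: a nonempty range with a
-- negative start (int('…-') is a ValueError) or with k = 0 (ZeroDivisionError).
def Pre_beautifulDays (i : Int) (j : Int) (k : Int) : Prop := j < i ∨ (0 ≤ i ∧ k ≠ 0)
instance (i : Int) (j : Int) (k : Int) : Decidable (Pre_beautifulDays i j k) := by
  unfold Pre_beautifulDays; infer_instance

def pvWitness_beautifulDays : Int × Int × Int := (1, 5, 3)

def Spec_beautifulDays (i : Int) (j : Int) (k : Int) (out : Int) : Prop := out = beautifulDays_alt i j k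
instance (i : Int) (j : Int) (k : Int) (out : Int) : Decidable (Spec_beautifulDays i j k out) := by unfold Spec_beautifulDays; infer_instance

-- ===== CLAIM (what is proved, stated in full; the proofs are below) =====
def Claim_equal_beautifulDays : Prop := ∀ (i : Int) (j : Int) (k : Int), Dom_beautifulDays i j k → Pre_beautifulDays i j k → Spec_beautifulDays i j k (beautifulDays i j k)

-- ===== LEMMAS AND PROOFS =====

-- A's countdown index loop over day_string builds exactly day_string.reverse.
theorem pv_revbuild (cs : List Char) :
    (PySem.List.pyRange (PySem.List.len cs - 1) (-1) (-1)).foldl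
      (fun acc integer => acc ++ [PySem.List.pyGetD cs integer ' ']) [] = cs.reverse := by
  have h : PySem.List.pyRange (PySem.List.len cs - 1) (-1) (-1)
      = (PySem.List.pyRange 0 (PySem.List.len cs) 1).reverse := by
    rw [PySem.List.pyRange_neg_one_eq_reverse]; norm_num
  rw [h, PySem.List.foldl_append_singleton_eq_map, List.nil_append, List.map_reverse,
    PySem.List.map_pyGetD_pyRange_zero]

-- the per-day 0/1 contribution both programs compute
def pvHit (k : Int) (day : Int) : Int :=
  match PySem.Int.ofChars? (PySem.Int.toChars day).reverse with
  | some r => if PySem.Int.mod (day - r) k = 0 then 1 else 0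
  | none => 0

theorem pv_a_eq (i j k : Int) :
    beautifulDays i j k = ((PySem.List.pyRange i (j + 1) 1).map (pvHit k)).sum := by
  unfold beautifulDays
  rw [PySem.List.foldl_congr_mem _ _ (fun acc day => acc + pvHit k day) 0 ?_,
    PySem.List.foldl_add, Int.zero_add]
  intro acc day _
  simp only [pv_revbuild]
  unfold pvHit
  cases PySem.Int.ofChars? (PySem.Int.toChars day).reverse with
  | none => simp
  | some r => by_cases h : PySem.Int.mod (day - r) k = 0 <;> simp [h]

theorem pv_b_eq (i j k : Int) :
    beautifulDays_alt i j k = ((PySem.List.pyRange i (j + 1) 1).map (pvHit k)).sum := by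
  unfold beautifulDays_alt
  congr 1
  refine List.map_congr_left (fun day _ => ?_)
  rw [PySem.List.slice?_none_none_neg_one]
  rfl

-- ===== VERDICT (by name: the statement is the Claim_ definition above) =====
theorem beautifulDays_spec : Claim_equal_beautifulDays := by
  intro i j k _ _
  unfold Spec_beautifulDays
  rw [pv_a_eq, pv_b_eq]
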